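-- pv_equiv track=rewrite | github.com/Cheol-H-Jeong/eodinga | eodinga/query/text_match.py | _fold_phrase_boundaries
-- ===== SOURCE A (Python) =====
-- def _fold_phrase_boundaries(value: str) -> str:
--     parts: list[str] = []
--     in_gap = False
--     for char in value:
--         if char.isalnum():
--             parts.append(char)
--             in_gap = False
--             continue
--         if not in_gap and parts:
--             parts.append(" ")
--         in_gap = True
--     return "".join(parts).strip()
-- ===== SOURCE B (Python) =====
-- def _fold_phrase_boundaries(value: str) -> str:
--     # Group consecutive characters by isalnum, then join the alnum tokens.
--     groups: list = []  # list of (key, chars) for maximal runs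
--     for ch in value:
--         key = ch.isalnum()
--         if groups and groups[-1][0] == key:
--             groups[-1][1].append(ch)
--         else:
--             groups.append((key, [ch]))
--     return " ".join("".join(g) for k, g in groups if k)
-- ===== Notes on version B (the rewrite author's own statement) =====
-- stated objective: alternative
-- what changed: B first groups the string into maximal runs of equal isalnum-ness (a groupby-style single pass building a token list), then joins the alphanumeric tokens with single spaces, instead of streaming characters through an in_gap flag and stripping afterwards.
import Mathlib
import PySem

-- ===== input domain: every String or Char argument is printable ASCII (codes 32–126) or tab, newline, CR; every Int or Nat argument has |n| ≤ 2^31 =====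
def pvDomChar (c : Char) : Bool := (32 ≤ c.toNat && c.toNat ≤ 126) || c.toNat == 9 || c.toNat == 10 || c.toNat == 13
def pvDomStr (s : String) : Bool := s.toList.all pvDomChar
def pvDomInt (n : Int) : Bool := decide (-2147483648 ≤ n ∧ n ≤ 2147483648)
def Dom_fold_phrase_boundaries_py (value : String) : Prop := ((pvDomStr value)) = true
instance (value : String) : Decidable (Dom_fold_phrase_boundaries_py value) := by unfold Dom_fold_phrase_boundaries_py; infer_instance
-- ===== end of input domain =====

-- B replaces A's streaming in_gap flag by a groupby-style pass: it builds the list of maximal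
-- runs of equal isalnum-ness, then joins the alphanumeric tokens with single spaces (objective: alternative).

-- ===== PORT A =====
-- Python's `parts` is a list of single-character strings; "".join(parts) is ported by keeping
-- the characters directly in a List Char.
def pvStepA (st : List Char × Bool) (c : Char) : List Char × Bool :=
  if PySem.Chars.isalnum c then (st.1 ++ [c], false)
  else (if !st.2 && !st.1.isEmpty then st.1 ++ [' '] else st.1, true)

def fold_phrase_boundaries_py (value : String) : String :=
  String.ofList (PySem.Chars.strip (value.toList.foldl pvStepA ([], false)).1)

-- ===== PORT B =====
-- Source B appends the char to the last group when its key matches, else starts a new group; the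
-- accumulator is kept reversed (head = last group) so append-at-end is a head operation, and is
-- reversed once at the end.
def pvGroupStep (acc : List (Bool × List Char)) (c : Char) : List (Bool × List Char) :=
  match acc with
  | (k, g) :: rest =>
      if k = PySem.Chars.isalnum c then (k, g ++ [c]) :: rest
      else (PySem.Chars.isalnum c, [c]) :: (k, g) :: rest
  | [] => [(PySem.Chars.isalnum c, [c])]

def fold_phrase_boundaries_py_alt (value : String) : String :=
  let groups := (value.toList.foldl pvGroupStep []).reverse
  String.ofList (PySem.Chars.join [' '] ((groups.filter (·.1)).map (·.2)))

-- ===== PRECONDITION & SPEC =====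
def Spec_fold_phrase_boundaries_py (value : String) (out : String) : Prop := out = fold_phrase_boundaries_py_alt value
instance (value : String) (out : String) : Decidable (Spec_fold_phrase_boundaries_py value out) := by unfold Spec_fold_phrase_boundaries_py; infer_instance

-- ===== CLAIM (what is proved, stated in full; the proofs are below) =====
def Claim_equal_fold_phrase_boundaries_py : Prop := ∀ (value : String), Dom_fold_phrase_boundaries_py value → Spec_fold_phrase_boundaries_py value (fold_phrase_boundaries_py value)

-- ===== LEMMAS AND PROOFS =====

-- an alphanumeric character is not whitespace
theorem pvAlnumNotSpace (c : Char) (h : PySem.Chars.isalnum c = true) :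
    PySem.Chars.isspace c = false := by
  simp only [PySem.Chars.isalnum, PySem.Chars.isalpha, PySem.Chars.isdigit, PySem.Chars.isupper,
    PySem.Chars.islower, Bool.or_eq_true, Bool.and_eq_true, decide_eq_true_eq, Char.le_def,
    UInt32.le_iff_toNat_le, show ('0'.val.toNat = 48) from rfl, show ('9'.val.toNat = 57) from rfl,
    show ('A'.val.toNat = 65) from rfl, show ('Z'.val.toNat = 90) from rfl,
    show ('a'.val.toNat = 97) from rfl, show ('z'.val.toNat = 122) from rfl] at h
  simp only [PySem.Chars.isspace, Bool.or_eq_false_iff, Bool.and_eq_false_iff,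
    decide_eq_false_iff_not, Char.toNat]
  omega

-- rendering of a group list: an alnum group contributes its chars, a gap group one space
def pvFlat (gs : List (Bool × List Char)) : List Char :=
  gs.flatMap (fun p => if p.1 then p.2 else [' '])

-- drop a leading gap group (it contributes nothing in A, since parts is still empty there)
def pvDropLead : List (Bool × List Char) → List (Bool × List Char)
  | (false, _) :: r => r
  | gs => gs

def pvToks (gs : List (Bool × List Char)) : List (List Char) := (gs.filter (·.1)).map (·.2)

-- the coupling invariant between A's state and B's (reversed) group accumulator
def pvInv (st : List Char × Bool) (acc : List (Bool × List Char)) : Prop :=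
  (∀ p ∈ acc, p.2 ≠ []) ∧
  acc.IsChain (fun p q => p.1 ≠ q.1) ∧
  st.2 = (match acc with | (k, _) :: _ => !k | [] => false) ∧
  st.1 = pvFlat (pvDropLead acc.reverse) ∧
  (∀ p ∈ acc, p.1 = true → ∀ c ∈ p.2, PySem.Chars.isalnum c = true)

theorem pvDropLead_append (x : List (Bool × List Char)) (y) (hx : x ≠ []) :
    pvDropLead (x ++ [y]) = pvDropLead x ++ [y] := by
  match x with
  | (true, g) :: r => rfl
  | (false, g) :: r => rfl

theorem pvFlat_append (x y : List (Bool × List Char)) :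
    pvFlat (x ++ y) = pvFlat x ++ pvFlat y := by
  simp [pvFlat]

theorem pvFlatDrop_snoc (acc : List (Bool × List Char)) (y : Bool × List Char) (h : acc ≠ []) :
    pvFlat (pvDropLead (acc.reverse ++ [y])) =
      pvFlat (pvDropLead acc.reverse) ++ (if y.1 then y.2 else [' ']) := by
  rw [pvDropLead_append _ _ (by simpa using h), pvFlat_append]
  simp [pvFlat]

theorem pvInv_step (st : List Char × Bool) (acc : List (Bool × List Char)) (c : Char)
    (h : pvInv st acc) : pvInv (pvStepA st c) (pvGroupStep acc c) := by
  obtain ⟨hne, hch, hgap, hparts, hal⟩ := h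
  by_cases hac : PySem.Chars.isalnum c = true
  · -- alphanumeric character
    have hst : pvStepA st c = (st.1 ++ [c], false) := by simp [pvStepA, hac]
    cases acc with
    | nil =>
        have hgs : pvGroupStep [] c = [(true, [c])] := by simp [pvGroupStep, hac]
        have hp : st.1 = [] := by simpa [pvFlat, pvDropLead] using hparts
        rw [hst, hgs]
        refine ⟨by simp, List.isChain_singleton _, rfl, ?_, ?_⟩
        · simp [hp, pvFlat, pvDropLead]
        · intro p hp' _ d hd
          simp at hp'; subst hp'
          simp at hd; subst hd
          exact hac
    | cons p rest =>
        obtain ⟨k, g⟩ := p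
        have hgne : g ≠ [] := hne (k, g) List.mem_cons_self
        cases k with
        | true =>
            have hgs : pvGroupStep ((true, g) :: rest) c = (true, g ++ [c]) :: rest := by
              simp [pvGroupStep, hac]
            rw [hst, hgs]
            refine ⟨?_, ?_, rfl, ?_, ?_⟩
            · intro q hq
              rcases List.mem_cons.mp hq with hq | hq
              · subst hq; simp
              · exact hne q (List.mem_cons_of_mem _ hq)
            · cases rest with
              | nil => exact List.isChain_singleton _
              | cons q t =>
                  rw [List.isChain_cons_cons] at hch ⊢
                  exact ⟨hch.1, hch.2⟩
            · show st.1 ++ [c] = _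
              cases rest with
              | nil =>
                  simp [pvFlat, pvDropLead] at hparts ⊢
                  simp [hparts]
              | cons q t =>
                  rw [List.reverse_cons, pvFlatDrop_snoc _ _ (by simp)] at hparts ⊢
                  simp [hparts]
            · intro q hq hq1 d hd
              rcases List.mem_cons.mp hq with hq | hq
              · subst hq
                simp at hd
                rcases hd with hd | hd
                · exact hal (true, g) List.mem_cons_self rfl d hd
                · subst hd; exact hac
              · exact hal q (List.mem_cons_of_mem _ hq) hq1 d hd
        | false =>
            have hgs : pvGroupStep ((false, g) :: rest) c
                = (true, [c]) :: (false, g) :: rest := by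
              simp [pvGroupStep, hac]
            rw [hst, hgs]
            refine ⟨?_, ?_, rfl, ?_, ?_⟩
            · intro q hq
              rcases List.mem_cons.mp hq with hq | hq
              · subst hq; simp
              · exact hne q hq
            · rw [List.isChain_cons_cons]
              exact ⟨by simp, hch⟩
            · show st.1 ++ [c] = _
              rw [List.reverse_cons (a := (true, [c])), pvFlatDrop_snoc _ _ (by simp)]
              simp [hparts]
            · intro q hq hq1 d hd
              rcases List.mem_cons.mp hq with hq | hq
              · subst hq
                simp at hd; subst hd; exact hac
              · exact hal q hq hq1 d hd
  · -- gap character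
    have hac' : PySem.Chars.isalnum c = false := by simpa using hac
    cases acc with
    | nil =>
        have hgs : pvGroupStep [] c = [(false, [c])] := by simp [pvGroupStep, hac']
        have hp : st.1 = [] := by simpa [pvFlat, pvDropLead] using hparts
        have hg : st.2 = false := by simpa using hgap
        have hst : pvStepA st c = (st.1, true) := by
          simp [pvStepA, hac', hp]
        rw [hst, hgs]
        refine ⟨by simp, List.isChain_singleton _, rfl, ?_, ?_⟩
        · simp [hp, pvFlat, pvDropLead]
        · intro q hq hq1
          simp at hq; subst hq; simp at hq1
    | cons p rest =>
        obtain ⟨k, g⟩ := p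
        have hgne : g ≠ [] := hne (k, g) List.mem_cons_self
        cases k with
        | false =>
            have hgap' : st.2 = true := by simpa using hgap
            have hst : pvStepA st c = (st.1, true) := by simp [pvStepA, hac', hgap']
            have hgs : pvGroupStep ((false, g) :: rest) c = (false, g ++ [c]) :: rest := by
              simp [pvGroupStep, hac']
            rw [hst, hgs]
            refine ⟨?_, ?_, rfl, ?_, ?_⟩
            · intro q hq
              rcases List.mem_cons.mp hq with hq | hq
              · subst hq; simp
              · exact hne q (List.mem_cons_of_mem _ hq)
            · cases rest with
              | nil => exact List.isChain_singleton _
              | cons q t =>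
                  rw [List.isChain_cons_cons] at hch ⊢
                  exact ⟨hch.1, hch.2⟩
            · show st.1 = _
              cases rest with
              | nil => simpa [pvFlat, pvDropLead] using hparts
              | cons q t =>
                  rw [List.reverse_cons, pvFlatDrop_snoc _ _ (by simp)] at hparts ⊢
                  simpa using hparts
            · intro q hq hq1 d hd
              rcases List.mem_cons.mp hq with hq | hq
              · subst hq; simp at hq1
              · exact hal q (List.mem_cons_of_mem _ hq) hq1 d hd
        | true =>
            have hgap' : st.2 = false := by simpa using hgap
            have hpne : st.1 ≠ [] := by
              rw [hparts]
              cases rest with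
              | nil => simpa [pvFlat, pvDropLead] using hgne
              | cons q t =>
                  rw [List.reverse_cons, pvFlatDrop_snoc _ _ (by simp)]
                  simp [hgne]
            have hst : pvStepA st c = (st.1 ++ [' '], true) := by
              simp [pvStepA, hac', hgap', List.isEmpty_eq_false_iff.mpr hpne]
            have hgs : pvGroupStep ((true, g) :: rest) c
                = (false, [c]) :: (true, g) :: rest := by
              simp [pvGroupStep, hac']
            rw [hst, hgs]
            refine ⟨?_, ?_, rfl, ?_, ?_⟩
            · intro q hq
              rcases List.mem_cons.mp hq with hq | hq
              · subst hq; simp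
              · exact hne q hq
            · rw [List.isChain_cons_cons]
              exact ⟨by simp, hch⟩
            · show st.1 ++ [' '] = _
              rw [List.reverse_cons (a := (false, [c])), pvFlatDrop_snoc _ _ (by simp)]
              simp [hparts]
            · intro q hq hq1 d hd
              rcases List.mem_cons.mp hq with hq | hq
              · subst hq; simp at hq1
              · exact hal q hq hq1 d hd

theorem pvInv_fold (l : List Char) (st : List Char × Bool) (acc : List (Bool × List Char))
    (h : pvInv st acc) : pvInv (l.foldl pvStepA st) (l.foldl pvGroupStep acc) := by
  induction l generalizing st acc with
  | nil => exact h
  | cons c t ih => exact ih _ _ (pvInv_step st acc c h)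

def pvHeadGap : List (Bool × List Char) → Bool
  | (false, _) :: _ => true
  | _ => false

def pvLastGap (gs : List (Bool × List Char)) : Bool :=
  match gs.getLast? with
  | some (false, _) => true
  | _ => false

theorem pvToks_cons_true (g : List Char) (r : List (Bool × List Char)) :
    pvToks ((true, g) :: r) = g :: pvToks r := by simp [pvToks]

theorem pvToks_cons_false (g : List Char) (r : List (Bool × List Char)) :
    pvToks ((false, g) :: r) = pvToks r := by simp [pvToks]

theorem pvLastGap_cons_cons (p q : Bool × List Char) (t : List (Bool × List Char)) :
    pvLastGap (p :: q :: t) = pvLastGap (q :: t) := by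
  simp [pvLastGap, List.getLast?_cons_cons]

theorem pvIntercalate_cons (x : List Char) (xs : List (List Char)) (h : xs ≠ []) :
    [' '].intercalate (x :: xs) = x ++ [' '] ++ [' '].intercalate xs := by
  cases xs with
  | nil => simp at h
  | cons y ys => simp [List.intercalate, List.intersperse]

-- structure of the rendering of an alternating group list
theorem pvFlat_struct (gs : List (Bool × List Char))
    (hch : gs.IsChain (fun p q => p.1 ≠ q.1)) :
    pvFlat gs = (if pvHeadGap gs then [' '] else []) ++ [' '].intercalate (pvToks gs) ++
      (if pvLastGap gs && !(pvToks gs).isEmpty then [' '] else []) := by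
  induction gs with
  | nil => simp [pvFlat, pvHeadGap, pvLastGap, pvToks, List.intercalate]
  | cons p rest ih =>
      obtain ⟨k, g⟩ := p
      cases k with
      | true =>
          cases rest with
          | nil =>
              simp [pvFlat, pvHeadGap, pvLastGap, pvToks, List.intercalate]
          | cons q t =>
              have hq : q.1 = false := by
                rw [List.isChain_cons_cons] at hch
                simpa using (hch.1).symm
              have ihr := ih (List.isChain_cons_cons.mp hch).2
              rw [pvToks_cons_true, pvLastGap_cons_cons]
              show g ++ pvFlat (q :: t) = _
              by_cases ht : pvToks (q :: t) = []
              · -- no further tokens: q :: t must be the single gap group [q]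
                have hT : t = [] := by
                  cases t with
                  | nil => rfl
                  | cons q2 t2 =>
                      rw [List.isChain_cons_cons, List.isChain_cons_cons] at hch
                      have hq2 : q2.1 = true := by
                        have := hch.2.1
                        rw [hq] at this
                        simpa using this.symm
                      obtain ⟨k2, g2⟩ := q2
                      simp at hq2; subst hq2
                      simp [pvToks] at ht
                subst hT
                obtain ⟨k1, g1⟩ := q
                simp at hq; subst hq
                simp [pvFlat, pvToks, pvLastGap, pvHeadGap, List.intercalate]
              · rw [pvIntercalate_cons _ _ ht, ihr]
                obtain ⟨k1, g1⟩ := q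
                simp at hq; subst hq
                simp [pvHeadGap, List.isEmpty_eq_false_iff.mpr ht]
      | false =>
          cases rest with
          | nil =>
              simp [pvFlat, pvHeadGap, pvLastGap, pvToks, List.intercalate]
          | cons q t =>
              have hq : q.1 = true := by
                rw [List.isChain_cons_cons] at hch
                simpa using (hch.1).symm
              have ihr := ih (List.isChain_cons_cons.mp hch).2
              rw [pvToks_cons_false, pvLastGap_cons_cons]
              show [' '] ++ pvFlat (q :: t) = _
              rw [ihr]
              obtain ⟨k1, g1⟩ := q
              simp at hq; subst hq
              simp [pvHeadGap, pvToks]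

theorem pvLstrip_noop (l : List Char) (h : ∀ c, l.head? = some c → PySem.Chars.isspace c = false) :
    PySem.Chars.lstrip l = l := by
  cases l with
  | nil => rfl
  | cons c t => simp [PySem.Chars.lstrip, h c rfl]

theorem pvRstrip_noop (l : List Char) (h : ∀ c, l.getLast? = some c → PySem.Chars.isspace c = false) :
    PySem.Chars.rstrip l = l := by
  cases hr : l.reverse with
  | nil => simp_all [PySem.Chars.rstrip]
  | cons c t =>
      have hc : l.getLast? = some c := by
        rw [← List.head?_reverse, hr]; rfl
      have hl : t.reverse ++ [c] = l := by
        have := congrArg List.reverse hr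
        simpa using this.symm
      simp [PySem.Chars.rstrip, hr, h c hc, hl]

theorem pvRstrip_space (l : List Char) : PySem.Chars.rstrip (l ++ [' ']) = PySem.Chars.rstrip l := by
  simp [PySem.Chars.rstrip, List.dropWhile]
  rfl

-- head and last characters of the joined token list are alphanumeric
theorem pvInter_ne_nil (toks : List (List Char)) (hne : toks ≠ [])
    (h : ∀ t ∈ toks, t ≠ []) : [' '].intercalate toks ≠ [] := by
  cases toks with
  | nil => simp at hne
  | cons x xs =>
      cases xs with
      | nil =>
          have : [' '].intercalate [x] = x := by simp [List.intercalate]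
          rw [this]; exact h x (by simp)
      | cons y ys =>
          rw [pvIntercalate_cons _ _ (by simp)]
          have hx : x ≠ [] := h x (by simp)
          simp [hx]

theorem pvInter_head (toks : List (List Char)) (hne : toks ≠ [])
    (h : ∀ t ∈ toks, t ≠ [] ∧ ∀ c ∈ t, PySem.Chars.isalnum c = true) :
    ∀ c, ([' '].intercalate toks).head? = some c → PySem.Chars.isalnum c = true := by
  intro c hc
  cases toks with
  | nil => simp at hne
  | cons x xs =>
      obtain ⟨hx, hxal⟩ := h x (by simp)
      obtain ⟨d, x', rfl⟩ : ∃ d x', x = d :: x' := by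
        cases x with | nil => simp at hx | cons d x' => exact ⟨d, x', rfl⟩
      have hd : ([' '].intercalate ((d :: x') :: xs)).head? = some d := by
        cases xs with
        | nil => simp [List.intercalate]
        | cons y ys => rw [pvIntercalate_cons _ _ (by simp)]; simp
      rw [hd] at hc
      obtain rfl : d = c := by simpa using hc
      exact hxal d (by simp)

theorem pvInter_last (toks : List (List Char)) (hne : toks ≠ [])
    (h : ∀ t ∈ toks, t ≠ [] ∧ ∀ c ∈ t, PySem.Chars.isalnum c = true) :
    ∀ c, ([' '].intercalate toks).getLast? = some c → PySem.Chars.isalnum c = true := by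
  induction toks with
  | nil => simp at hne
  | cons x xs ih =>
      intro c hc
      cases xs with
      | nil =>
          have hx : [' '].intercalate [x] = x := by simp [List.intercalate]
          rw [hx] at hc
          exact (h x (by simp)).2 c (List.mem_of_getLast? hc)
      | cons y ys =>
          rw [pvIntercalate_cons _ _ (by simp),
            List.getLast?_append_of_ne_nil _
              (pvInter_ne_nil (y :: ys) (by simp) (fun t ht => (h t (by simp [ht])).1))] at hc
          exact ih (by simp) (fun t ht => h t (by simp [ht])) c hc

theorem pvToks_mem (gs : List (Bool × List Char)) (t : List Char) (ht : t ∈ pvToks gs) :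
    (true, t) ∈ gs := by
  simp only [pvToks, List.mem_map, List.mem_filter] at ht
  obtain ⟨p, ⟨hp, hp1⟩, rfl⟩ := ht
  obtain ⟨k, g⟩ := p
  simp at hp1
  subst hp1
  exact hp

-- stripping the rendering of an alternating list whose head is not a gap gives the joined tokens
theorem pvStrip_flat (gs : List (Bool × List Char))
    (hch : gs.IsChain (fun p q => p.1 ≠ q.1))
    (hhd : pvHeadGap gs = false)
    (hal : ∀ p ∈ gs, p.1 = true → ∀ c ∈ p.2, PySem.Chars.isalnum c = true)
    (hne : ∀ p ∈ gs, p.2 ≠ []) :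
    PySem.Chars.strip (pvFlat gs) = [' '].intercalate (pvToks gs) := by
  rw [pvFlat_struct gs hch, hhd]
  by_cases htoks : pvToks gs = []
  · simp [htoks, List.intercalate, PySem.Chars.strip, PySem.Chars.lstrip, PySem.Chars.rstrip]
  · have htp : ∀ t ∈ pvToks gs, t ≠ [] ∧ ∀ c ∈ t, PySem.Chars.isalnum c = true := by
      intro t ht
      have hmem := pvToks_mem gs t ht
      exact ⟨hne _ hmem, hal _ hmem rfl⟩
    have hInil : [' '].intercalate (pvToks gs) ≠ [] :=
      pvInter_ne_nil _ htoks (fun t ht => (htp t ht).1)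
    have hhead : ∀ c, ([' '].intercalate (pvToks gs)).head? = some c →
        PySem.Chars.isspace c = false :=
      fun c hc => pvAlnumNotSpace c (pvInter_head _ htoks htp c hc)
    have hlast : ∀ c, ([' '].intercalate (pvToks gs)).getLast? = some c →
        PySem.Chars.isspace c = false :=
      fun c hc => pvAlnumNotSpace c (pvInter_last _ htoks htp c hc)
    set I := [' '].intercalate (pvToks gs) with hI
    simp only [List.isEmpty_eq_false_iff.mpr htoks]
    by_cases hlg : pvLastGap gs = true
    · rw [hlg]
      show PySem.Chars.strip ([] ++ I ++ [' ']) = I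
      have hlsI : PySem.Chars.lstrip (I ++ [' ']) = I ++ [' '] := by
        refine pvLstrip_noop _ (fun c hc => ?_)
        obtain ⟨d, I', hdI⟩ : ∃ d I', I = d :: I' := by
          cases hIc : I with
          | nil => exact absurd hIc hInil
          | cons d I' => exact ⟨d, I', rfl⟩
        rw [hdI] at hc
        simp at hc
        exact hhead c (by rw [hdI]; simp [hc])
      show PySem.Chars.rstrip (PySem.Chars.lstrip ([] ++ I ++ [' '])) = I
      rw [List.nil_append, hlsI, pvRstrip_space]
      exact pvRstrip_noop I hlast
    · rw [Bool.eq_false_iff.mpr hlg]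
      show PySem.Chars.strip ([] ++ I ++ []) = I
      rw [List.append_nil, List.nil_append]
      show PySem.Chars.rstrip (PySem.Chars.lstrip I) = I
      rw [pvLstrip_noop I (fun c hc => hhead c hc)]
      exact pvRstrip_noop I hlast

theorem pvFinal (gs : List (Bool × List Char))
    (hch : gs.IsChain (fun p q => p.1 ≠ q.1))
    (hal : ∀ p ∈ gs, p.1 = true → ∀ c ∈ p.2, PySem.Chars.isalnum c = true)
    (hne : ∀ p ∈ gs, p.2 ≠ []) :
    PySem.Chars.strip (pvFlat (pvDropLead gs)) = [' '].intercalate (pvToks gs) := by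
  cases gs with
  | nil => simp [pvDropLead, pvFlat, pvToks, List.intercalate,
      PySem.Chars.strip, PySem.Chars.lstrip, PySem.Chars.rstrip]
  | cons p rest =>
      obtain ⟨k, g⟩ := p
      cases k with
      | true =>
          show PySem.Chars.strip (pvFlat ((true, g) :: rest)) = _
          exact pvStrip_flat _ hch rfl hal hne
      | false =>
          show PySem.Chars.strip (pvFlat rest) = _
          rw [show pvToks ((false, g) :: rest) = pvToks rest from pvToks_cons_false g rest]
          have hcht : rest.IsChain (fun p q => p.1 ≠ q.1) := by
            cases rest with
            | nil => exact List.IsChain.nil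
            | cons q t => exact (List.isChain_cons_cons.mp hch).2
          have hhd : pvHeadGap rest = false := by
            cases rest with
            | nil => rfl
            | cons q t =>
                have hq : q.1 = true := by
                  rw [List.isChain_cons_cons] at hch
                  simpa using (hch.1).symm
                obtain ⟨k1, g1⟩ := q
                simp at hq; subst hq
                rfl
          exact pvStrip_flat rest hcht hhd
            (fun p hp => hal p (List.mem_cons_of_mem _ hp))
            (fun p hp => hne p (List.mem_cons_of_mem _ hp))

-- ===== VERDICT (by name: the statement is the Claim_ definition above) =====
theorem fold_phrase_boundaries_py_spec : Claim_equal_fold_phrase_boundaries_py := by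
  intro value _
  have h0 : pvInv ([], false) [] := by
    refine ⟨by simp, List.IsChain.nil, rfl, rfl, by simp⟩
  have h := pvInv_fold value.toList ([], false) [] h0
  obtain ⟨hne, hch, -, hparts, hal⟩ := h
  show _ = fold_phrase_boundaries_py_alt value
  unfold fold_phrase_boundaries_py fold_phrase_boundaries_py_alt
  rw [hparts]
  congr 1
  have hch' : (List.foldl pvGroupStep [] value.toList).reverse.IsChain (fun p q => p.1 ≠ q.1) := by
    rw [List.isChain_reverse]
    exact hch.imp (fun _ _ h => Ne.symm h)
  have := pvFinal (List.foldl pvGroupStep [] value.toList).reverse hch'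
    (by intro p hp; exact hal p (List.mem_reverse.mp hp))
    (by intro p hp; exact hne p (List.mem_reverse.mp hp))
  rw [this]
  rfl
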